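-- pv_equiv track=rewrite | github.com/lettucegoblin/RedditSim | inference_server/inferencing_model.py | deal_with_cutoff
-- ===== SOURCE A (Python) =====
-- def deal_with_cutoff(output):
--     punctuation = [".", "!", "?", "\"", "'", ";"]
--     last_punctuation_index = -1
--     for p in punctuation:
--         index = output.rfind(p)
--         if index > last_punctuation_index:
--             last_punctuation_index = index
--     if last_punctuation_index != -1:
--         output = output[:last_punctuation_index + 1]
--     else:
--         if len(output) <= 3:
--             output = ""
--     return output
-- ===== SOURCE B (Python) =====
-- def deal_with_cutoff(output):
--     punct_set = {".", "!", "?", "\"", "'", ";"}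
--     last_punctuation_index = -1
--     for i in range(len(output) - 1, -1, -1):
--         if output[i] in punct_set:
--             last_punctuation_index = i
--             break
--     if last_punctuation_index != -1:
--         output = output[:last_punctuation_index + 1]
--     elif len(output) <= 3:
--         output = ""
--     return output
-- ===== Notes on version B (the rewrite author's own statement) =====
-- stated objective: alternative
-- what changed: Replaces six full rfind scans (one per punctuation mark) with a single reverse scan of the string that stops at the first (i.e. rightmost) punctuation character found.
import Mathlib
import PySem

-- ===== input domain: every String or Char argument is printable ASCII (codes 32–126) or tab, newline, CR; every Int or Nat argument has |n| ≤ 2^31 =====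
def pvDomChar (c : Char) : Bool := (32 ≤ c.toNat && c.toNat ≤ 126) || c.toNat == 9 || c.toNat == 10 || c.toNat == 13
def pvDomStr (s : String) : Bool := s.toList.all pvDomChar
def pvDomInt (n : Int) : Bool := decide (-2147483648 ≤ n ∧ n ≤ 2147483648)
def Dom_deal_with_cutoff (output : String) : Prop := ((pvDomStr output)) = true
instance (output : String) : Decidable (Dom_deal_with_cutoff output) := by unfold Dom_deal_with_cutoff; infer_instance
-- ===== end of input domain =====

-- B replaces A's six whole-string rfind scans by one reverse scan stopping at the first hit (alternative decomposition, same result).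

-- ===== PORT A =====
def deal_with_cutoff (output : String) : String :=
  let punctuation : List Char := ['.', '!', '?', '"', '\'', ';']
  let lpi := punctuation.foldl (fun acc p =>
      let index := PySem.Str.rfind output (String.ofList [p])
      if index > acc then index else acc) (-1)
  if lpi ≠ -1 then PySem.Str.slice output none (some (lpi + 1))
  else if PySem.Str.len output ≤ 3 then "" else output

-- ===== PORT B =====
def dwcPunctSet : PySem.Set Char := PySem.Set.ofList ['.', '!', '?', '"', '\'', ';']

-- the 'for i in range(len(output)-1, -1, -1): … break' loop: walk the reversed characters, i counting down
def dwcScanRev : List Char → Int → Int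
  | [], _ => -1
  | c :: rest, i => if PySem.Set.contains dwcPunctSet c then i else dwcScanRev rest (i - 1)

def deal_with_cutoff_alt (output : String) : String :=
  let lpi := dwcScanRev output.toList.reverse ((output.toList.length : Int) - 1)
  if lpi ≠ -1 then PySem.Str.slice output none (some (lpi + 1))
  else if PySem.Str.len output ≤ 3 then "" else output

-- ===== PRECONDITION & SPEC =====
def Spec_deal_with_cutoff (output : String) (out : String) : Prop := out = deal_with_cutoff_alt output
instance (output : String) (out : String) : Decidable (Spec_deal_with_cutoff output out) := by unfold Spec_deal_with_cutoff; infer_instance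

-- ===== CLAIM (what is proved, stated in full; the proofs are below) =====
def Claim_equal_deal_with_cutoff : Prop := ∀ (output : String), Dom_deal_with_cutoff output → Spec_deal_with_cutoff output (deal_with_cutoff output)

-- ===== LEMMAS AND PROOFS =====
theorem dwc_go_succ (s sub : List Char) (j : Nat) :
    PySem.Chars.rfind.go s sub (j + 1) =
      if sub.isPrefixOf (s.drop (j + 1)) then ((j : Int) + 1) else PySem.Chars.rfind.go s sub j := by
  simp [PySem.Chars.rfind.go]
theorem dwc_go_zero (s sub : List Char) :
    PySem.Chars.rfind.go s sub 0 = if sub.isPrefixOf s then 0 else -1 := by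
  simp [PySem.Chars.rfind.go]

theorem dwc_go_cons (a p : Char) (cs : List Char) (n : Nat) :
    PySem.Chars.rfind.go (a :: cs) [p] (n + 1) =
      if PySem.Chars.rfind.go cs [p] n ≠ -1 then PySem.Chars.rfind.go cs [p] n + 1
      else if a = p then 0 else -1 := by
  induction n with
  | zero =>
    rw [dwc_go_succ, dwc_go_zero, dwc_go_zero]
    simp only [List.drop_succ_cons, List.drop_zero]
    by_cases h1 : [p].isPrefixOf cs = true
    · simp [h1]
    · simp only [Bool.not_eq_true] at h1
      have h2 : [p].isPrefixOf (a :: cs) = (p == a) := by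
        simp [List.isPrefixOf]
      by_cases h3 : a = p
      · simp [h1, h3]
      · have h4 : (p == a) = false := by simp [Ne.symm h3]
        simp [h1, h2, h3, h4]
  | succ n ih =>
    rw [dwc_go_succ, dwc_go_succ cs [p] n]
    simp only [List.drop_succ_cons]
    by_cases h1 : [p].isPrefixOf (List.drop (n + 1) cs) = true
    · have : ((n : Int) + 1) ≠ -1 := by omega
      simp [h1, this]
    · simp only [Bool.not_eq_true] at h1
      simp [h1, ih]

theorem dwc_rfind_nil (p : Char) : PySem.Chars.rfind [] [p] = -1 := by
  simp [PySem.Chars.rfind, dwc_go_zero, List.isPrefixOf]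

theorem dwc_rfind_cons (a p : Char) (cs : List Char) :
    PySem.Chars.rfind (a :: cs) [p] =
      if PySem.Chars.rfind cs [p] ≠ -1 then PySem.Chars.rfind cs [p] + 1
      else if a = p then 0 else -1 := by
  simp only [PySem.Chars.rfind, List.length_cons]
  exact dwc_go_cons a p cs cs.length

theorem dwc_rfind_ge (cs : List Char) (p : Char) : -1 ≤ PySem.Chars.rfind cs [p] := by
  induction cs with
  | nil => rw [dwc_rfind_nil]
  | cons a cs ih => rw [dwc_rfind_cons]; split_ifs <;> omega

def dwcStep (x : Int) : Int := if x = -1 then -1 else x + 1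

theorem dwc_rfind_cons_max (a p : Char) (cs : List Char) :
    PySem.Chars.rfind (a :: cs) [p] =
      max (dwcStep (PySem.Chars.rfind cs [p])) (if a = p then 0 else -1) := by
  rw [dwc_rfind_cons]
  have := dwc_rfind_ge cs p
  unfold dwcStep
  split_ifs <;> omega

-- fold over the punctuation list as foldl max over mapped values
theorem dwc_fold_eq_foldmax (P : List Char) (r : Char → Int) (acc : Int) :
    P.foldl (fun acc p => if r p > acc then r p else acc) acc
      = P.foldl (fun acc p => max acc (r p)) acc := by
  induction P generalizing acc with
  | nil => rfl
  | cons q P ih =>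
    simp only [List.foldl_cons]
    rw [ih]
    congr 1
    omega

theorem dwc_foldmax_distrib (P : List Char) (f g : Char → Int) (x y : Int) :
    P.foldl (fun acc p => max acc (max (f p) (g p))) (max x y)
      = max (P.foldl (fun acc p => max acc (f p)) x) (P.foldl (fun acc p => max acc (g p)) y) := by
  induction P generalizing x y with
  | nil => rfl
  | cons q P ih =>
    simp only [List.foldl_cons]
    rw [← ih]
    congr 1
    omega

theorem dwc_foldmax_step (P : List Char) (f : Char → Int) (x : Int) (hx : -1 ≤ x)
    (hf : ∀ p, -1 ≤ f p) :
    P.foldl (fun acc p => max acc (dwcStep (f p))) (dwcStep x)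
      = dwcStep (P.foldl (fun acc p => max acc (f p)) x) := by
  induction P generalizing x with
  | nil => rfl
  | cons q P ih =>
    simp only [List.foldl_cons]
    rw [← ih (max x (f q)) (by omega)]
    congr 1
    have := hf q
    unfold dwcStep
    split_ifs <;> omega

theorem dwc_foldmax_ind (P : List Char) (a : Char) (x : Int) (hx : x = -1 ∨ x = 0) :
    P.foldl (fun acc p => max acc (if a = p then 0 else -1)) x
      = if (x = 0 ∨ a ∈ P) then 0 else -1 := by
  induction P generalizing x with
  | nil => rcases hx with h | h <;> simp [h]
  | cons q P ih =>
    simp only [List.foldl_cons, List.mem_cons]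
    by_cases h : a = q
    · rw [if_pos h, ih (max x 0) (by omega)]
      have hm : max x 0 = 0 := by omega
      simp [hm, h]
    · simp only [if_neg h]
      rw [ih (max x (-1)) (by omega)]
      have hm : max x (-1) = x := by omega
      rw [hm]
      simp [h]

def dwcLastP : List Char → Int
  | [] => -1
  | a :: cs => if dwcLastP cs ≠ -1 then dwcLastP cs + 1 else if a ∈ (['.', '!', '?', '"', '\'', ';'] : List Char) then 0 else -1

theorem dwcLastP_ge (cs : List Char) : -1 ≤ dwcLastP cs := by
  induction cs with
  | nil => simp [dwcLastP]
  | cons a cs ih => simp only [dwcLastP]; split_ifs <;> omega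

theorem dwc_A_last (cs : List Char) :
    (['.', '!', '?', '"', '\'', ';'] : List Char).foldl
        (fun acc p => if PySem.Chars.rfind cs [p] > acc then PySem.Chars.rfind cs [p] else acc) (-1)
      = dwcLastP cs := by
  induction cs with
  | nil => simp [dwc_rfind_nil, List.foldl, dwcLastP]
  | cons a cs ih =>
    rw [dwc_fold_eq_foldmax]
    simp only [dwc_rfind_cons_max]
    have hdist := dwc_foldmax_distrib (['.', '!', '?', '"', '\'', ';'] : List Char)
      (fun p => dwcStep (PySem.Chars.rfind cs [p])) (fun p => if a = p then 0 else -1) (-1) (-1)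
    have hm : max (-1 : Int) (-1) = -1 := by omega
    rw [hm] at hdist
    rw [hdist]
    have hstepfold :
        (['.', '!', '?', '"', '\'', ';'] : List Char).foldl
            (fun acc p => max acc (dwcStep (PySem.Chars.rfind cs [p]))) (-1)
          = dwcStep ((['.', '!', '?', '"', '\'', ';'] : List Char).foldl
              (fun acc p => max acc (PySem.Chars.rfind cs [p])) (-1)) := by
      have h := dwc_foldmax_step (['.', '!', '?', '"', '\'', ';'] : List Char)
        (fun p => PySem.Chars.rfind cs [p]) (-1) (by omega) (fun p => dwc_rfind_ge cs p)
      have h1 : dwcStep (-1) = -1 := by unfold dwcStep; simp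
      rw [h1] at h
      exact h
    rw [hstepfold]
    have hA : (['.', '!', '?', '"', '\'', ';'] : List Char).foldl
        (fun acc p => max acc (PySem.Chars.rfind cs [p])) (-1) = dwcLastP cs := by
      rw [← dwc_fold_eq_foldmax]; exact ih
    rw [hA, dwc_foldmax_ind (['.', '!', '?', '"', '\'', ';'] : List Char) a (-1) (Or.inl rfl)]
    have hcond : (((-1 : Int) = 0 ∨ a ∈ (['.', '!', '?', '"', '\'', ';'] : List Char)) ↔ a ∈ (['.', '!', '?', '"', '\'', ';'] : List Char)) := by simp
    rw [if_congr hcond rfl rfl]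
    have hge := dwcLastP_ge cs
    simp only [dwcLastP]
    unfold dwcStep
    split_ifs <;> omega

theorem dwc_contains_eq (c : Char) :
    PySem.Set.contains dwcPunctSet c = decide (c ∈ (['.', '!', '?', '"', '\'', ';'] : List Char)) := by
  have h : dwcPunctSet = (['.', '!', '?', '"', '\'', ';'] : List Char) := by decide
  rw [h]
  simp [PySem.Set.contains]

theorem dwc_scan_append (xs : List Char) (a : Char) (i : Int) (h : (xs.length : Int) ≤ i + 1) :
    dwcScanRev (xs ++ [a]) i =
      if dwcScanRev xs i ≠ -1 then dwcScanRev xs i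
      else if PySem.Set.contains dwcPunctSet a then i - xs.length else -1 := by
  induction xs generalizing i with
  | nil => simp [dwcScanRev]
  | cons c xs ih =>
    have hi : (0:Int) ≤ i := by
      simp only [List.length_cons] at h; push_cast at h
      have : (0:Int) ≤ (xs.length : Int) := by positivity
      omega
    simp only [List.cons_append, dwcScanRev]
    by_cases hc : PySem.Set.contains dwcPunctSet c = true
    · rw [if_pos hc, if_pos hc, if_pos (by omega)]
    · simp only [Bool.not_eq_true] at hc
      simp only [hc, Bool.false_eq_true, if_false]
      rw [ih (i-1) (by simp only [List.length_cons] at h; push_cast at h ⊢; omega)]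
      simp only [List.length_cons]
      split_ifs <;> push_cast <;> omega

theorem dwc_scan_shift (xs : List Char) (i : Int) (h : (xs.length : Int) ≤ i + 1) :
    dwcScanRev xs (i + 1) = if dwcScanRev xs i = -1 then -1 else dwcScanRev xs i + 1 := by
  induction xs generalizing i with
  | nil => simp [dwcScanRev]
  | cons c xs ih =>
    have hi : (0:Int) ≤ i := by
      simp only [List.length_cons] at h; push_cast at h
      have : (0:Int) ≤ (xs.length : Int) := by positivity
      omega
    simp only [dwcScanRev]
    by_cases hc : PySem.Set.contains dwcPunctSet c = true
    · rw [if_pos hc, if_pos hc, if_neg (by omega)]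
    · simp only [Bool.not_eq_true] at hc
      simp only [hc, Bool.false_eq_true, if_false]
      have he : i + 1 - 1 = (i - 1) + 1 := by omega
      rw [he, ih (i-1) (by simp only [List.length_cons] at h; push_cast at h ⊢; omega)]

theorem dwc_B_last (cs : List Char) :
    dwcScanRev cs.reverse ((cs.length : Int) - 1) = dwcLastP cs := by
  induction cs with
  | nil => simp [dwcScanRev, dwcLastP]
  | cons a cs ih =>
    simp only [List.reverse_cons, List.length_cons]
    rw [show ((cs.length + 1 : Nat) : Int) - 1 = (cs.length : Int) by push_cast; omega]
    rw [dwc_scan_append cs.reverse a (cs.length) (by simp)]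
    rw [show (cs.length : Int) = ((cs.length : Int) - 1) + 1 by omega]
    rw [dwc_scan_shift cs.reverse _ (by simp)]
    rw [List.length_reverse, ih]
    have hge := dwcLastP_ge cs
    rw [show (cs.length : Int) - 1 + 1 - (cs.length : Int) = 0 by omega]
    simp only [dwcLastP, dwc_contains_eq]
    split_ifs <;> first | rfl | omega | simp_all

-- ===== VERDICT (by name: the statement is the Claim_ definition above) =====
theorem deal_with_cutoff_spec : Claim_equal_deal_with_cutoff := by
  intro output _
  unfold Spec_deal_with_cutoff deal_with_cutoff deal_with_cutoff_alt
  simp only [PySem.Str.rfind_eq, String.toList_ofList]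
  rw [dwc_A_last output.toList, dwc_B_last output.toList]
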